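-- pv_equiv track=rewrite | github.com/akunobi/blz | bot.py | _join_single_chars
-- ===== SOURCE A (Python) =====
-- def _join_single_chars(tokens):
--     """Junta chars sueltos consecutivos → detecta 'n i g g e r' y 'f.a.g'."""
--     chunks, buf = [], []
--     for t in tokens:
--         if len(t) == 1:
--             buf.append(t)
--         else:
--             if len(buf) >= 3:
--                 chunks.append(''.join(buf))
--             buf = []
--     if len(buf) >= 3:
--         chunks.append(''.join(buf))
--     return chunks
-- ===== SOURCE B (Python) =====
-- def _join_single_chars(tokens):
--     """Junta chars sueltos consecutivos → detecta 'n i g g e r' y 'f.a.g'."""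
--     chunks = []
--     i, n = 0, len(tokens)
--     while i < n:
--         if len(tokens[i]) == 1:
--             j = i
--             while j < n and len(tokens[j]) == 1:
--                 j += 1
--             if j - i >= 3:
--                 chunks.append(''.join(tokens[i:j]))
--             i = j
--         else:
--             i += 1
--     return chunks
-- ===== Notes on version B (the rewrite author's own statement) =====
-- stated objective: alternative
-- what changed: Replaces the buffer-accumulating fold with its end-of-loop flush by an index scan that finds each maximal run of single-char tokens in place and joins a slice, so no buffer and no post-loop flush exist.
import Mathlib
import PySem

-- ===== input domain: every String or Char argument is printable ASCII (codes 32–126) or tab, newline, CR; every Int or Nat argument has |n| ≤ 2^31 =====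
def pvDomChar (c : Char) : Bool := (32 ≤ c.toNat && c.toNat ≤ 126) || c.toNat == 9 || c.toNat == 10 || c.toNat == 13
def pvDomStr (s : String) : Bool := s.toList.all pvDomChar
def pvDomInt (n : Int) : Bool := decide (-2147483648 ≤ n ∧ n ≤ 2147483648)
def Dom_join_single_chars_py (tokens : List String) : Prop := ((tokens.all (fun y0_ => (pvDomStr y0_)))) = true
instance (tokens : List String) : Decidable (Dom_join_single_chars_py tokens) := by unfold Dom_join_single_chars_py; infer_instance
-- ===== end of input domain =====

-- B replaces A's buffer-accumulating fold (with its post-loop flush) by a scan over maximal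
-- runs of single-char tokens (take/drop a run, join it if long enough); alternative, same cost.


-- ===== PORT A =====
-- the body of A's for-loop, over the state (chunks, buf)
def stepA (st : List String × List String) (t : String) : List String × List String :=
  if PySem.Str.len t = 1 then (st.1, st.2 ++ [t])
  else if 3 ≤ st.2.length then (st.1 ++ [PySem.Str.join "" st.2], ([] : List String))
  else (st.1, ([] : List String))

def join_single_chars_py (tokens : List String) : List String :=
  let st := tokens.foldl stepA (([] : List String), ([] : List String))
  if 3 ≤ st.2.length then st.1 ++ [PySem.Str.join "" st.2] else st.1

-- ===== PORT B =====
def isSingle (t : String) : Bool := PySem.Str.len t = 1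

def join_single_chars_py_alt : List String → List String
  | [] => []
  | t :: ts =>
    if isSingle t then
      (if 3 ≤ (t :: ts.takeWhile isSingle).length
         then [PySem.Str.join "" (t :: ts.takeWhile isSingle)] else [])
        ++ join_single_chars_py_alt (ts.dropWhile isSingle)
    else join_single_chars_py_alt ts
termination_by ts => ts.length
decreasing_by
  · have := List.length_dropWhile_le isSingle ts
    simp; omega
  · simp

-- ===== PRECONDITION & SPEC =====
def Spec_join_single_chars_py (tokens : List String) (out : List String) : Prop := out = join_single_chars_py_alt tokens
instance (tokens : List String) (out : List String) : Decidable (Spec_join_single_chars_py tokens out) := by unfold Spec_join_single_chars_py; infer_instance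

-- ===== CLAIM (what is proved, stated in full; the proofs are below) =====
def Claim_equal_join_single_chars_py : Prop := ∀ (tokens : List String), Dom_join_single_chars_py tokens → Spec_join_single_chars_py tokens (join_single_chars_py tokens)

-- ===== LEMMAS AND PROOFS =====
def emitRun (buf : List String) : List String :=
  if 3 ≤ buf.length then [PySem.Str.join "" buf] else []

theorem alt_group (ts : List String) :
    join_single_chars_py_alt ts
      = emitRun (ts.takeWhile isSingle) ++ join_single_chars_py_alt (ts.dropWhile isSingle) := by
  cases ts with
  | nil => simp [join_single_chars_py_alt, emitRun]
  | cons t ts =>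
    by_cases h : isSingle t
    · rw [join_single_chars_py_alt]
      simp [h, emitRun]
    · simp [h, emitRun]

theorem foldl_flush (ts : List String) : ∀ (chunks buf : List String),
    (let st := ts.foldl stepA (chunks, buf)
     if 3 ≤ st.2.length then st.1 ++ [PySem.Str.join "" st.2] else st.1)
      = chunks ++ emitRun (buf ++ ts.takeWhile isSingle)
          ++ join_single_chars_py_alt (ts.dropWhile isSingle) := by
  induction ts with
  | nil =>
    intro chunks buf
    simp [join_single_chars_py_alt, emitRun]
    split_ifs <;> simp
  | cons t ts ih =>
    intro chunks buf
    by_cases h : isSingle t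
    · have h1 : PySem.Str.len t = 1 := by simpa [isSingle] using h
      simp only [List.foldl_cons, stepA, h1, List.takeWhile_cons, h,
        List.dropWhile_cons, if_true]
      have := ih chunks (buf ++ [t])
      simp only [List.append_assoc, List.cons_append, List.nil_append] at this ⊢
      exact this
    · have h1 : ¬ PySem.Str.len t = 1 := by simpa [isSingle] using h
      have key : stepA (chunks, buf) t = (chunks ++ emitRun buf, []) := by
        simp only [stepA, h1, emitRun]
        split_ifs <;> simp_all
      simp only [List.foldl_cons, key, List.takeWhile_cons, h, List.dropWhile_cons, if_false,
        Bool.false_eq_true]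
      have := ih (chunks ++ emitRun buf) []
      rw [this]
      have halt : join_single_chars_py_alt (t :: ts) = join_single_chars_py_alt ts := by
        rw [join_single_chars_py_alt]; simp [h]
      rw [halt, alt_group ts]
      simp [List.append_assoc]

-- ===== VERDICT (by name: the statement is the Claim_ definition above) =====
theorem join_single_chars_py_spec : Claim_equal_join_single_chars_py := by
  intro tokens _
  unfold Spec_join_single_chars_py join_single_chars_py
  have := foldl_flush tokens [] []
  simp only [List.nil_append] at this
  rw [this, ← alt_group]
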